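-- pv_equiv track=rewrite | github.com/baeksoojin/CodingTest | 프로그래머스/1/42840. 모의고사/모의고사.py | solution
-- ===== SOURCE A (Python) =====
-- def solution(answers):
--     answer = []
--
--     one_answer_list = [1,2,3,4,5]
--     two_answer_list = [2, 1, 2, 3, 2, 4, 2, 5]
--     three_answer_list = [ 3, 3, 1, 1, 2, 2, 4, 4, 5, 5]
--
--     correct1 = correct2 = correct3 = 0
--
--     for i in range(len(answers)):
--         if answers[i] == one_answer_list[i%len(one_answer_list)]:
--             correct1+=1
--         if answers[i] == two_answer_list[i%len(two_answer_list)]: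
--             correct2+=1
--         if answers[i] == three_answer_list[i%len(three_answer_list)]:
--             correct3+=1
--
--     values = [correct1, correct2, correct3]
--     max_value = max(values)
--
--     for i in range(3):
--         if max_value == values[i]:
--             answer.append(i+1)
--
--     return answer
-- ===== SOURCE B (Python) =====
-- def solution(answers):
--     patterns = ([1, 2, 3, 4, 5],
--                 [2, 1, 2, 3, 2, 4, 2, 5],
--                 [3, 3, 1, 1, 2, 2, 4, 4, 5, 5])
--     scores = []
--     for p in patterns:
--         s, start = 0, 0
--         while start < len(answers):
--             s += sum(a == b for a, b in zip(answers[start:start + len(p)], p))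
--             start += len(p)
--         scores.append(s)
--     best = max(scores)
--     return [i + 1 for i, s in enumerate(scores) if s == best]
-- ===== Notes on version B (the rewrite author's own statement) =====
-- stated objective: alternative
-- what changed: Replaces A's single index-driven pass (answers[i] compared against each pattern via i % len modular indexing, three counters at once) by an index-arithmetic-free chunked traversal: for each pattern the answer list is cut into pattern-length slices, each zipped directly against the pattern, then an arg-max comprehension over the score list picks the winners.
import Mathlib
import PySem

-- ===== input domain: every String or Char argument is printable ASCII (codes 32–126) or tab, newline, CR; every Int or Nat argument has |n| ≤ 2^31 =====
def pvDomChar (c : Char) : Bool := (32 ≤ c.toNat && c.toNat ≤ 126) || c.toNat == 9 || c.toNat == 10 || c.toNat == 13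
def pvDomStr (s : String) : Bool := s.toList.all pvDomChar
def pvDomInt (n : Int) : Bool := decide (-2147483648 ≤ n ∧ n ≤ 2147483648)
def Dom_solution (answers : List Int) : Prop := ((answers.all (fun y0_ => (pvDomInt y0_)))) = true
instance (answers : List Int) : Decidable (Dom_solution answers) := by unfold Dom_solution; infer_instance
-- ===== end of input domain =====

-- B replaces A's index-driven pass (answers[i] vs pattern[i % len] for all three patterns at
-- once) by an index-free chunked traversal: each pattern is zipped against the answer list,
-- sliced into pattern-length chunks; same values, same cost.

-- ===== PORT A =====
-- A's loop 'for i in range(len(answers))' only reads answers[i], so folding over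
-- enumerate yields exactly the pairs (i, answers[i]); the pattern index i % len is
-- always in range, so the getD-form of list indexing is exact here.
def solution (answers : List Int) : List Int :=
  let one : List Int := [1, 2, 3, 4, 5]
  let two : List Int := [2, 1, 2, 3, 2, 4, 2, 5]
  let three : List Int := [3, 3, 1, 1, 2, 2, 4, 4, 5, 5]
  let cs := (PySem.List.enumerate answers 0).foldl (fun (c : Int × Int × Int) p =>
      let c1 := if p.2 == PySem.List.pyGetD one (PySem.Int.mod p.1 5) 0 then c.1 + 1 else c.1
      let c2 := if p.2 == PySem.List.pyGetD two (PySem.Int.mod p.1 8) 0 then c.2.1 + 1 else c.2.1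
      let c3 := if p.2 == PySem.List.pyGetD three (PySem.Int.mod p.1 10) 0 then c.2.2 + 1 else c.2.2
      (c1, c2, c3)) (0, 0, 0)
  let values : List Int := [cs.1, cs.2.1, cs.2.2]
  let maxValue := (PySem.List.max? values (fun x => x)).getD 0  -- values is nonempty: max never fails
  (PySem.List.pyRange 0 3 1).foldl (fun answer i =>
      if maxValue == PySem.List.pyGetD values i 0 then answer ++ [i + 1] else answer) []

-- ===== PORT B =====
-- sum(a == b for a, b in zip(rest, p))  (zip truncates at the shorter list)
def zipScore : List Int → List Int → Int
  | a :: t, b :: u => (if a == b then 1 else 0) + zipScore t u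
  | _, _ => 0

-- the 'while start < len(answers):' loop of Source B; the 'p = []' branch is a
-- totality guard only (the three patterns are nonempty literals), never taken by solution_alt
def chunkScore (p answers : List Int) (start : Nat) : Int :=
  if _h1 : answers.length ≤ start then 0
  else if _h2 : p = [] then 0
  else zipScore (PySem.List.slice answers (some (start : Int)) (some ((start : Int) + (p.length : Int)))) p
       + chunkScore p answers (start + p.length)
termination_by answers.length - start
decreasing_by
  have h2 : p.length ≠ 0 := fun h => _h2 (List.eq_nil_of_length_eq_zero h)
  omega

def solution_alt (answers : List Int) : List Int :=
  let patterns : List (List Int) := [[1, 2, 3, 4, 5], [2, 1, 2, 3, 2, 4, 2, 5], [3, 3, 1, 1, 2, 2, 4, 4, 5, 5]]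
  let scores := patterns.foldl (fun acc p => acc ++ [chunkScore p answers 0]) []
  let best := (PySem.List.max? scores (fun x => x)).getD 0  -- scores is nonempty: max never fails
  (PySem.List.enumerate scores 0).filterMap (fun q => if q.2 == best then some (q.1 + 1) else none)

-- ===== PRECONDITION & SPEC =====
def Spec_solution (answers : List Int) (out : List Int) : Prop := out = solution_alt answers
instance (answers : List Int) (out : List Int) : Decidable (Spec_solution answers out) := by unfold Spec_solution; infer_instance

-- ===== CLAIM (what is proved, stated in full; the proofs are below) =====
def Claim_equal_solution : Prop := ∀ (answers : List Int), Dom_solution answers → Spec_solution answers (solution answers)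

-- ===== LEMMAS AND PROOFS =====

-- number of matches of cyclic pattern p along an enumerated answer list (A's shape)
def cnt (p : List Int) : List (Int × Int) → Int
  | [] => 0
  | q :: t => (if q.2 == PySem.List.pyGetD p (PySem.Int.mod q.1 (p.length : Int)) 0 then 1 else 0) + cnt p t

-- the same count with a Nat offset, the common reference point of both ports
def cm (p : List Int) : Nat → List Int → Int
  | _, [] => 0
  | i, a :: t => (if a == PySem.List.pyGetD p ((i % p.length : Nat) : Int) 0 then 1 else 0) + cm p (i + 1) t

lemma a_fold (l : List (Int × Int)) (c1 c2 c3 : Int) :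
    l.foldl (fun (c : Int × Int × Int) p =>
      let d1 := if p.2 == PySem.List.pyGetD [1,2,3,4,5] (PySem.Int.mod p.1 5) 0 then c.1 + 1 else c.1
      let d2 := if p.2 == PySem.List.pyGetD [2,1,2,3,2,4,2,5] (PySem.Int.mod p.1 8) 0 then c.2.1 + 1 else c.2.1
      let d3 := if p.2 == PySem.List.pyGetD [3,3,1,1,2,2,4,4,5,5] (PySem.Int.mod p.1 10) 0 then c.2.2 + 1 else c.2.2
      (d1, d2, d3)) (c1, c2, c3)
      = (c1 + cnt [1,2,3,4,5] l, c2 + cnt [2,1,2,3,2,4,2,5] l, c3 + cnt [3,3,1,1,2,2,4,4,5,5] l) := by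
  have h5 : ((([1,2,3,4,5] : List Int)).length : Int) = 5 := rfl
  have h8 : ((([2,1,2,3,2,4,2,5] : List Int)).length : Int) = 8 := rfl
  have h10 : ((([3,3,1,1,2,2,4,4,5,5] : List Int)).length : Int) = 10 := rfl
  induction l generalizing c1 c2 c3 with
  | nil => simp only [List.foldl_nil, cnt, add_zero]
  | cons q t ih =>
    simp only [List.foldl_cons]
    rw [ih]
    simp only [cnt, h5, h8, h10]
    split_ifs <;> simp only [Prod.mk.injEq] <;> exact ⟨by ring, by ring, by ring⟩

-- A's enumerated count is cm
lemma cnt_enum (p : List Int) : ∀ (xs : List Int) (k : Nat),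
    cnt p (PySem.List.enumerate xs (k : Int)) = cm p k xs := by
  intro xs
  induction xs with
  | nil => intro k; simp [PySem.List.enumerate_nil, cnt, cm]
  | cons a t ih =>
    intro k
    rw [PySem.List.enumerate_cons, cnt, cm]
    have hk1 : ((k : Int) + 1) = ((k + 1 : Nat) : Int) := by push_cast; ring
    rw [hk1, ih (k + 1), PySem.Int.mod_natCast]

-- zipping against p.drop i counts matches at offsets i, i+1, … (all < |p|)
lemma zip_cm (p : List Int) : ∀ (xs : List Int) (i : Nat), i + xs.length ≤ p.length →
    zipScore xs (p.drop i) = cm p i xs := by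
  intro xs
  induction xs with
  | nil =>
    intro i _
    cases hd : p.drop i <;> simp [zipScore, cm]
  | cons a t ih =>
    intro i h
    have hi : i < p.length := by simp at h; omega
    rw [List.drop_eq_getElem_cons hi, zipScore, cm,
        Nat.mod_eq_of_lt hi, PySem.List.pyGetD_natCast,
        List.getD_eq_getElem p 0 hi, ih (i + 1) (by simp at h ⊢; omega)]

lemma cm_append (p : List Int) : ∀ (xs ys : List Int) (i : Nat),
    cm p i (xs ++ ys) = cm p i xs + cm p (i + xs.length) ys := by
  intro xs
  induction xs with
  | nil => intro ys i; simp [cm]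
  | cons a t ih =>
    intro ys i
    simp only [List.cons_append, cm, ih, List.length_cons]
    have : i + 1 + t.length = i + (t.length + 1) := by omega
    rw [this]; ring

lemma cm_congr (p : List Int) : ∀ (xs : List Int) (i j : Nat),
    i % p.length = j % p.length → cm p i xs = cm p j xs := by
  intro xs
  induction xs with
  | nil => intro i j _; rfl
  | cons a t ih =>
    intro i j h
    have h1 : (i + 1) % p.length = (j + 1) % p.length := by
      rw [Nat.add_mod i 1, Nat.add_mod j 1, h]
    rw [cm, cm, h, ih (i + 1) (j + 1) h1]

-- the whole chunked loop counts exactly the cyclic matches of the suffix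
lemma chunk_eq (p answers : List Int) (hp : p ≠ []) :
    ∀ (start : Nat), chunkScore p answers start = cm p 0 (answers.drop start) := by
  have hL : p.length ≠ 0 := fun h => hp (List.eq_nil_of_length_eq_zero h)
  have H : ∀ (n start : Nat), answers.length - start ≤ n →
      chunkScore p answers start = cm p 0 (answers.drop start) := by
    intro n
    induction n with
    | zero =>
      intro start h
      rw [chunkScore, dif_pos (by omega), List.drop_eq_nil_of_le (by omega)]; rfl
    | succ n ih =>
      intro start h
      by_cases hx : answers.length ≤ start
      · rw [chunkScore, dif_pos hx, List.drop_eq_nil_of_le hx]; rfl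
      · rw [chunkScore, dif_neg hx, dif_neg hp, ih (start + p.length) (by omega),
            PySem.List.slice_natCast_add]
        have hz : zipScore ((answers.drop start).take p.length) p
            = cm p 0 ((answers.drop start).take p.length) := by
          have := zip_cm p ((answers.drop start).take p.length) 0
            (by simp only [List.length_take]; omega)
          simpa using this
        have hdd : (answers.drop start).drop p.length = answers.drop (start + p.length) := by
          rw [List.drop_drop]; try omega
        have hrhs : cm p 0 (answers.drop start)
            = cm p 0 ((answers.drop start).take p.length)
              + cm p (0 + ((answers.drop start).take p.length).length)
                  ((answers.drop start).drop p.length) := by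
          conv_lhs => rw [← List.take_append_drop p.length (answers.drop start)]
          rw [cm_append]
        rw [hz, hrhs, hdd]
        have htl : ((answers.drop start).take p.length).length
            = min p.length (answers.drop start).length := List.length_take
        by_cases hge : p.length ≤ (answers.drop start).length
        · have : cm p (0 + ((answers.drop start).take p.length).length)
              (answers.drop (start + p.length))
              = cm p 0 (answers.drop (start + p.length)) := by
            apply cm_congr
            rw [htl, Nat.zero_add, Nat.min_eq_left hge, Nat.mod_self, Nat.zero_mod]
          rw [this]
        · have hdrop : answers.drop (start + p.length) = [] :=
            List.drop_eq_nil_of_le (by simp only [List.length_drop] at hge; omega)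
          rw [hdrop]; rfl
  intro start; exact H (answers.length - start) start le_rfl

lemma cnt_chunk (p : List Int) (hp : p ≠ []) (xs : List Int) :
    cnt p (PySem.List.enumerate xs 0) = chunkScore p xs 0 := by
  have h0 : (0 : Int) = ((0 : Nat) : Int) := rfl
  rw [h0, cnt_enum, chunk_eq p xs hp 0, List.drop_zero]

lemma beqc (m x : Int) : (m == x) = (x == m) := by
  by_cases h : m = x
  · simp [h]
  · simp [h, Ne.symm h]

lemma final_eq (s1 s2 s3 m : Int) :
    (PySem.List.pyRange 0 3 1).foldl
      (fun answer i => if m == PySem.List.pyGetD [s1, s2, s3] i 0 then answer ++ [i + 1] else answer) []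
    = (PySem.List.enumerate [s1, s2, s3] 0).filterMap
        (fun q => if q.2 == m then some (q.1 + 1) else none) := by
  have hr : PySem.List.pyRange 0 3 1 = [0, 1, 2] := by decide
  have g0 : PySem.List.pyGetD [s1, s2, s3] 0 0 = s1 := rfl
  have g1 : PySem.List.pyGetD [s1, s2, s3] 1 0 = s2 := rfl
  have g2 : PySem.List.pyGetD [s1, s2, s3] 2 0 = s3 := rfl
  have he : PySem.List.enumerate [s1, s2, s3] 0 = [(0, s1), (1, s2), (2, s3)] := by
    simp [PySem.List.enumerate]
  rw [hr, he]
  simp only [List.foldl_cons, List.foldl_nil, List.filterMap_cons, List.filterMap_nil,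
    g0, g1, g2, beqc m]
  cases hb1 : (s1 == m) <;> cases hb2 : (s2 == m) <;> cases hb3 : (s3 == m) <;>
    simp_all

-- ===== VERDICT (by name: the statement is the Claim_ definition above) =====
theorem solution_spec : Claim_equal_solution := by
  intro answers _
  show solution answers = solution_alt answers
  simp only [solution, solution_alt, List.foldl_cons, List.foldl_nil, List.nil_append,
    List.cons_append, a_fold, zero_add,
    cnt_chunk [1,2,3,4,5] (by decide) answers,
    cnt_chunk [2,1,2,3,2,4,2,5] (by decide) answers,
    cnt_chunk [3,3,1,1,2,2,4,4,5,5] (by decide) answers]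
  exact final_eq _ _ _ _
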